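-- pv_equiv track=rewrite | github.com/vmueller71/code-challenges | scale_balancing/solution.py | ScaleBalancing
-- ===== SOURCE A (Python) =====
-- def ScaleBalancing(tplWeights):
--     try:
--         current_weights = tplWeights[0]
--         tplWeights[1].append(0)
--         available_weights = list(set(tplWeights[1]))
--         available_weights.sort()
--         for i in available_weights:
--             for j in available_weights:
--                 if i != j:
--                     if current_weights[0] + i == current_weights[1] + j or\
--                     current_weights[0] == current_weights[1] + i + j or\
--                     current_weights[0] + i + j == current_weights[1]:
--                         result = [i, j]
--                         if 0 in result:
--                             result.remove(0)
--                         result.sort()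
--                         return result
--         return []
--     except Exception:
--         return []
-- ===== SOURCE B (Python) =====
-- def ScaleBalancing(tplWeights):
--     # Solve the balance equations for j per candidate i instead of scanning all pairs.
--     # Note: unlike A, this does not mutate tplWeights[1]; return value is identical.
--     if len(tplWeights) < 2 or len(tplWeights[0]) < 2:
--         return []
--     c0, c1 = tplWeights[0][0], tplWeights[0][1]
--     s = set(tplWeights[1])
--     s.add(0)
--     for i in sorted(s):
--         valid = [j for j in (c0 + i - c1, c0 - c1 - i, c1 - c0 - i) if j in s and j != i]
--         if valid:
--             j = min(valid)
--             return sorted(x for x in (i, j) if x != 0)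
--     return []
-- ===== Notes on version B (the rewrite author's own statement) =====
-- stated objective: alternative
-- what changed: Instead of scanning ordered pairs of available weights with a nested loop, B solves each balance equation for j in closed form per ascending i and checks the three candidate values against a hash set, taking the smallest valid one.
import Mathlib
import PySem

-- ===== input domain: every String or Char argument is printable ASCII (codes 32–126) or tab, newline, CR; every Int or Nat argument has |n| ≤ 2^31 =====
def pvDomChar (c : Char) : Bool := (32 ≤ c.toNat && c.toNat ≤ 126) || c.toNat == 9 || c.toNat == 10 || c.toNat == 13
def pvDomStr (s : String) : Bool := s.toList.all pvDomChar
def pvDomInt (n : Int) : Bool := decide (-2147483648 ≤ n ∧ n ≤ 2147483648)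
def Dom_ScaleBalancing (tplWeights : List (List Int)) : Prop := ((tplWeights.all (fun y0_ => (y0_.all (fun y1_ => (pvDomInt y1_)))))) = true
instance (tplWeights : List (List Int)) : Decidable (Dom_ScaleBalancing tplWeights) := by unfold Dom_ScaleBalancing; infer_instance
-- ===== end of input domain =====

-- B replaces A's nested pair scan by solving each balance equation for j (three candidates
-- per i) with a set lookup; return values proved equal. A also appends 0 to tplWeights[1]
-- in place (a side effect B does not perform): the equivalence is about the return value only.

-- ===== PORT A =====
-- result = [i, j]; if 0 in result: result.remove(0); result.sort(); return result
def pvMkResA (i j : Int) : List Int :=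
  let result := [i, j]
  let result := if (0 : Int) ∈ result then (PySem.List.remove? result 0).getD result else result
  PySem.List.sorted result (fun x => x) false

-- inner 'for j in available_weights' loop; some r = 'return r' (an IndexError on
-- current_weights lands in A's 'except' and returns []), none = fall through
def pvInnerA (cw : List Int) (i : Int) : List Int → Option (List Int)
  | [] => none
  | j :: rest =>
    if i ≠ j then
      match PySem.List.pyGet? cw 0, PySem.List.pyGet? cw 1 with
      | some c0, some c1 =>
        if c0 + i = c1 + j ∨ c0 = c1 + i + j ∨ c0 + i + j = c1 then
          some (pvMkResA i j)
        else pvInnerA cw i rest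
      | _, _ => some []
    else pvInnerA cw i rest

-- outer 'for i in available_weights' loop
def pvOuterA (cw : List Int) (avail : List Int) : List Int → List Int
  | [] => []
  | i :: rest =>
    match pvInnerA cw i avail with
    | some r => r
    | none => pvOuterA cw avail rest

def ScaleBalancing (tplWeights : List (List Int)) : List Int :=
  match PySem.List.pyGet? tplWeights 0 with
  | none => []          -- IndexError caught by 'except'
  | some cw =>
    match PySem.List.pyGet? tplWeights 1 with
    | none => []        -- IndexError caught by 'except'
    | some w1 =>
      let w1 := w1 ++ [0]
      let avail := PySem.List.sorted (PySem.Set.ofList w1) (fun x => x) false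
      pvOuterA cw avail avail

-- ===== PORT B =====
def pvAltGo (s : PySem.Set Int) (c0 c1 : Int) : List Int → List Int
  | [] => []
  | i :: rest =>
    let valid := [c0 + i - c1, c0 - c1 - i, c1 - c0 - i].filter
      (fun j => PySem.Set.contains s j && j != i)
    match PySem.List.min? valid (fun x => x) with
    | some j => PySem.List.sorted ([i, j].filter (fun x => x != 0)) (fun x => x) false
    | none => pvAltGo s c0 c1 rest

def ScaleBalancing_alt (tplWeights : List (List Int)) : List Int :=
  match tplWeights with
  | cw :: ws :: _ =>
    match cw with
    | c0 :: c1 :: _ =>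
      let s := PySem.Set.add (PySem.Set.ofList ws) 0
      pvAltGo s c0 c1 (PySem.List.sorted s (fun x => x) false)
    | _ => []
  | _ => []

-- ===== PRECONDITION & SPEC =====
def Spec_ScaleBalancing (tplWeights : List (List Int)) (out : List Int) : Prop := out = ScaleBalancing_alt tplWeights
instance (tplWeights : List (List Int)) (out : List Int) : Decidable (Spec_ScaleBalancing tplWeights out) := by unfold Spec_ScaleBalancing; infer_instance

-- ===== CLAIM (what is proved, stated in full; the proofs are below) =====
def Claim_equal_ScaleBalancing : Prop := ∀ (tplWeights : List (List Int)), Dom_ScaleBalancing tplWeights → Spec_ScaleBalancing tplWeights (ScaleBalancing tplWeights)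

-- ===== LEMMAS AND PROOFS =====

lemma pv_get0 {α : Type} (a b : α) (t : List α) : PySem.List.pyGet? (a::b::t) 0 = some a := by
  rw [show (0:Int) = ((0:Nat):Int) from rfl, PySem.List.pyGet?_natCast]; rfl

lemma pv_get1 {α : Type} (a b : α) (t : List α) : PySem.List.pyGet? (a::b::t) 1 = some b := by
  rw [show (1:Int) = ((1:Nat):Int) from rfl, PySem.List.pyGet?_natCast]; rfl

lemma pv_contains {s : PySem.Set Int} {x : Int} : PySem.Set.contains s x = true ↔ x ∈ s := by
  simp [PySem.Set.contains]

lemma pv_find?_eq_head?_filter (p : Int → Bool) (l : List Int) :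
    l.find? p = (l.filter p).head? := by
  induction l with
  | nil => rfl
  | cons a t ih =>
    rw [List.find?_cons, List.filter_cons]
    cases h : p a
    · rw [ih]; simp [h]
    · simp

-- a strictly increasing list's first element is the minimum of any list with the same members
lemma pv_head?_eq_min? (l1 l2 : List Int) (hp : l1.Pairwise (· < ·))
    (hm : ∀ x : Int, x ∈ l1 ↔ x ∈ l2) :
    l1.head? = PySem.List.min? l2 (fun x => x) := by
  cases l1 with
  | nil =>
    have h2 : l2 = [] := by
      cases l2 with
      | nil => rfl
      | cons b t => exact absurd ((hm b).2 (by simp)) (by simp)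
    subst h2; rfl
  | cons a t =>
    have ha2 : a ∈ l2 := (hm a).1 (by simp)
    cases hmin : PySem.List.min? l2 (fun x => x) with
    | none =>
      rw [PySem.List.min?_eq_none_iff] at hmin
      subst hmin; simp at ha2
    | some m =>
      have hm2 : m ∈ l2 := PySem.List.min?_mem hmin
      have hml : m ∈ a :: t := (hm m).2 hm2
      have h1 : a ≤ m := by
        rcases List.mem_cons.1 hml with h | h
        · omega
        · exact le_of_lt ((List.pairwise_cons.1 hp).1 m h)
      have h2 : m ≤ a := PySem.List.min?_isMin hmin a ha2
      simp [le_antisymm h1 h2]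

-- the inner j-loop of A is a find? over available_weights
lemma pv_inner_eq_find (c0 c1 : Int) (t : List Int) (i : Int) (js : List Int) :
    pvInnerA (c0::c1::t) i js
      = (js.find? (fun j => decide (i ≠ j) &&
          decide (c0 + i = c1 + j ∨ c0 = c1 + i + j ∨ c0 + i + j = c1))).map (pvMkResA i) := by
  induction js with
  | nil => rfl
  | cons j rest ih =>
    rw [List.find?_cons]
    by_cases hij : i ≠ j
    · by_cases hc : c0 + i = c1 + j ∨ c0 = c1 + i + j ∨ c0 + i + j = c1
      · simp [pvInnerA, hij, hc]
      · simp [pvInnerA, hij, hc, ih]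
    · simp [pvInnerA, hij, ih]

lemma pv_set_append (ws : List Int) :
    PySem.Set.ofList (ws ++ [(0:Int)]) = PySem.Set.add (PySem.Set.ofList ws) 0 := by
  simp [PySem.Set.ofList_eq_foldl, List.foldl_append]

-- both results built from the pair (i, j), i ≠ j, agree
lemma pv_res_eq (i j : Int) (hij : i ≠ j) :
    pvMkResA i j = PySem.List.sorted ([i, j].filter (fun x => x != 0)) (fun x => x) false := by
  unfold pvMkResA
  by_cases hi : i = 0
  · subst hi
    have hj : j ≠ 0 := fun h => hij h.symm
    simp [PySem.List.remove?_cons_self, hj]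
  · by_cases hj : j = 0
    · subst hj
      have h2 : PySem.List.remove? [i, (0:Int)] 0 = some [i] := by
        rw [PySem.List.remove?_cons_of_ne _ hi, PySem.List.remove?_cons_self]; rfl
      simp [h2, hi]
    · have hi' : (0:Int) ≠ i := fun h => hi h.symm
      have hj' : (0:Int) ≠ j := fun h => hj h.symm
      simp [hi', hj', hi, hj]

-- one step: A's inner loop over sorted(set(ws+[0])) = min of B's three solved candidates
lemma pv_step (c0 c1 i : Int) (t ws : List Int) :
    pvInnerA (c0::c1::t) i
        (PySem.List.sorted (PySem.Set.ofList (ws ++ [(0:Int)])) (fun x => x) false)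
      = (PySem.List.min?
          ([c0 + i - c1, c0 - c1 - i, c1 - c0 - i].filter
            (fun j => PySem.Set.contains (PySem.Set.add (PySem.Set.ofList ws) 0) j && j != i))
          (fun x => x)).map (pvMkResA i) := by
  rw [pv_inner_eq_find, pv_find?_eq_head?_filter]
  congr 1
  apply pv_head?_eq_min?
  · exact (PySem.List.sorted_ofList_pairwise_lt _).filter _
  · intro x
    simp only [List.mem_filter, PySem.List.mem_sorted, PySem.Set.mem_ofList,
      pv_contains, PySem.Set.mem_add, List.mem_cons,
      List.mem_append, Bool.and_eq_true, decide_eq_true_eq, bne_iff_ne, ne_eq,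
      List.not_mem_nil, or_false]
    constructor
    · rintro ⟨hmem, hne, hc⟩
      refine ⟨by omega, ?_, fun h => hne h.symm⟩
      rcases hmem with h | h
      · exact Or.inl h
      · exact Or.inr h
    · rintro ⟨hc, hmem, hne⟩
      exact ⟨hmem, fun h => hne h.symm, by omega⟩

-- the whole loop: A's outer loop = B's loop, over the same iteration list
lemma pv_loop (c0 c1 : Int) (t ws : List Int) (iter : List Int) :
    pvOuterA (c0::c1::t)
        (PySem.List.sorted (PySem.Set.ofList (ws ++ [(0:Int)])) (fun x => x) false) iter
      = pvAltGo (PySem.Set.add (PySem.Set.ofList ws) 0) c0 c1 iter := by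
  induction iter with
  | nil => rfl
  | cons i rest ih =>
    rw [pvOuterA, pvAltGo, pv_step c0 c1 i t ws]
    cases hmin : PySem.List.min?
        ([c0 + i - c1, c0 - c1 - i, c1 - c0 - i].filter
          (fun j => PySem.Set.contains (PySem.Set.add (PySem.Set.ofList ws) 0) j && j != i))
        (fun x => x) with
    | none => simpa [hmin] using ih
    | some j =>
      have hj := PySem.List.min?_mem hmin
      have hij : i ≠ j := by
        simp only [List.mem_filter, Bool.and_eq_true, bne_iff_ne, ne_eq] at hj
        exact fun h => hj.2.2 h.symm
      simp [pv_res_eq i j hij]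

-- A returns [] whenever current_weights has no index 1 (IndexError -> except -> [])
lemma pv_inner_short (cw : List Int) (h1 : PySem.List.pyGet? cw 1 = none) (i : Int)
    (js : List Int) : pvInnerA cw i js = none ∨ pvInnerA cw i js = some [] := by
  induction js with
  | nil => exact Or.inl rfl
  | cons j rest ih =>
    by_cases hij : i ≠ j
    · right
      cases h0 : PySem.List.pyGet? cw 0 <;> simp [pvInnerA, hij, h0, h1]
    · simpa [pvInnerA, hij] using ih

lemma pv_outer_short (cw : List Int) (h1 : PySem.List.pyGet? cw 1 = none) (avail : List Int)
    (js : List Int) : pvOuterA cw avail js = [] := by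
  induction js with
  | nil => rfl
  | cons i rest ih =>
    rcases pv_inner_short cw h1 i avail with h | h <;> simp [pvOuterA, h, ih]

-- ===== VERDICT (by name: the statement is the Claim_ definition above) =====
theorem ScaleBalancing_spec : Claim_equal_ScaleBalancing := by
  intro tpl _
  unfold Spec_ScaleBalancing ScaleBalancing ScaleBalancing_alt
  match tpl with
  | [] => rfl
  | [cw] =>
    rw [show PySem.List.pyGet? [cw] 0 = some cw from rfl,
       show PySem.List.pyGet? [cw] 1 = none from rfl]
  | cw :: ws :: rest =>
    rw [pv_get0 cw ws rest, pv_get1 cw ws rest]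
    match cw with
    | [] => exact pv_outer_short [] rfl _ _
    | [c] => exact pv_outer_short [c] rfl _ _
    | c0 :: c1 :: t =>
      show pvOuterA _ _ _ = pvAltGo _ _ _ _
      rw [pv_loop c0 c1 t ws, pv_set_append]
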